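-- pv_equiv track=rewrite | github.com/IsaacFigNewton/Text-to-Timeline | src/text_to_timeline/utils/pipeline.py | get_inter_cluster_edges
-- ===== SOURCE A (Python) =====
-- def get_referent_from_cluster(cluster_members) -> str:
--   return max(cluster_members, key=lambda x: len(x[2]))[2]
--
-- def get_inter_cluster_edges(edges:list, clusters:dict) -> list:
--
--   # get a list of nodes that have the word "and" in them
--   nodes = set()
--   for e in edges:
--     if e[0] is not None and e[2] is not None:
--       if e[0] not in nodes\
--         and "and" in e[0].split(" "):
--         nodes.add(e[0])
--       if e[2] not in nodes\
--         and "and" in e[0].split(" "):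
--         nodes.add(e[2])
--
--   # for each node, split on " and "
--   for node in nodes:
--     members = node.split(" and ")
--     for m in members:
--       for c_key, c_members in clusters.items():
--         # if a member is in a given cluster,
--         if m in c_members:
--           edges.append((
--               get_referent_from_cluster(c_members),
--               "member of",
--               node
--           ))
--
--   return edges
-- ===== SOURCE B (Python) =====
-- # A's test `m in c_members` compares a string against a list of 3-tuples, so it can
-- # never be true: the append branch is dead code and the function returns `edges`
-- # unchanged. B states that directly, skipping the node collection, splitting and
-- # cluster scans entirely.
-- def get_inter_cluster_edges(edges: list, clusters: dict) -> list:
--     return edges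
-- ===== Notes on version B (the rewrite author's own statement) =====
-- stated objective: simpler
-- what changed: A's membership test `m in c_members` compares a string against 3-tuples and can never be true, so A's nested node/split/cluster scans append nothing; B returns `edges` directly, and the Lean proof certifies that A's loops are the identity on the return value.
import Mathlib
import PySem

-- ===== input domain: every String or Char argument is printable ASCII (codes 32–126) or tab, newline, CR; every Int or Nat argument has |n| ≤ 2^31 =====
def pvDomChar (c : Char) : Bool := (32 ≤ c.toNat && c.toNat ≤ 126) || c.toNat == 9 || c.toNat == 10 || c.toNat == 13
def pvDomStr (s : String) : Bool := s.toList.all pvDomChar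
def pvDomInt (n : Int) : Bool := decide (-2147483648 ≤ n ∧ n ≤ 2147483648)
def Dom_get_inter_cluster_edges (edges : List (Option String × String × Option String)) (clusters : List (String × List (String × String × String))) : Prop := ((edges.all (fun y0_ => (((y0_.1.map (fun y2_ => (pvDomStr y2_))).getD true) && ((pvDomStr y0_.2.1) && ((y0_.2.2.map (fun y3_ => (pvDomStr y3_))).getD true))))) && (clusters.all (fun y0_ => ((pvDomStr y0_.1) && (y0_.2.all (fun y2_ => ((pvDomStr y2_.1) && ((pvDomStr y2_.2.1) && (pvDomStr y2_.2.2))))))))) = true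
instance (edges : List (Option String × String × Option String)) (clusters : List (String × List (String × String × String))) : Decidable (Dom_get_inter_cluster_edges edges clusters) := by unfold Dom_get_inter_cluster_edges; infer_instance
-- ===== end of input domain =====

-- A's test `m in c_members` compares a string against 3-tuples and never fires, so A
-- returns `edges` unchanged (and never mutates it); B is that identity, stated directly.

-- s.split(sep) for a non-empty literal sep (exact there: split? is none only for sep = "")
def pySplit (s sep : String) : List String := (PySem.Str.split? s sep).getD []

-- Python `m in c_members`: `==` between a str and a 3-tuple is always False
def pyStrEqTriple (_m : String) (_x : String × String × String) : Bool := false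

-- ===== PORT A =====
-- max(cluster_members, key=lambda x: len(x[2]))[2]; Python raises on [] — A never
-- actually calls this (its guard never fires), the [] default is unreachable
def get_referent_from_cluster (cluster_members : List (String × String × String)) : String :=
  ((PySem.List.max? cluster_members (fun x => PySem.Str.len x.2.2)).getD ("", "", "")).2.2

def a_nodes (edges : List (Option String × String × Option String)) : PySem.Set String :=
  edges.foldl (fun nodes e =>
    match e.1, e.2.2 with
    | some a, some b =>
      let nodes := if ¬ (PySem.Set.contains nodes a) ∧ (pySplit a " ").contains "and" then PySem.Set.add nodes a else nodes
      let nodes := if ¬ (PySem.Set.contains nodes b) ∧ (pySplit a " ").contains "and" then PySem.Set.add nodes b else nodes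
      nodes
    | _, _ => nodes) PySem.Set.empty

-- the `for node in nodes` loop iterates a Python set (unspecified order); the loop
-- body appends nothing (the test is constantly False), so iteration order is immaterial
def get_inter_cluster_edges (edges : List (Option String × String × Option String)) (clusters : List (String × List (String × String × String))) : List (Option String × String × Option String) :=
  (a_nodes edges).foldl (fun edges node =>
    (pySplit node " and ").foldl (fun edges m =>
      clusters.foldl (fun edges ckv =>
        if ckv.2.any (fun x => pyStrEqTriple m x) then
          edges ++ [(some (get_referent_from_cluster ckv.2), "member of", some node)]
        else edges) edges) edges) edges

-- ===== PORT B =====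
def get_inter_cluster_edges_alt (edges : List (Option String × String × Option String)) (_clusters : List (String × List (String × String × String))) : List (Option String × String × Option String) :=
  edges

-- ===== PRECONDITION & SPEC =====
def Spec_get_inter_cluster_edges (edges : List (Option String × String × Option String)) (clusters : List (String × List (String × String × String))) (out : List (Option String × String × Option String)) : Prop := out = get_inter_cluster_edges_alt edges clusters
instance (edges : List (Option String × String × Option String)) (clusters : List (String × List (String × String × String))) (out : List (Option String × String × Option String)) : Decidable (Spec_get_inter_cluster_edges edges clusters out) := by unfold Spec_get_inter_cluster_edges; infer_instance

-- ===== CLAIM (what is proved, stated in full; the proofs are below) =====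
def Claim_equal_get_inter_cluster_edges : Prop := ∀ (edges : List (Option String × String × Option String)) (clusters : List (String × List (String × String × String))), Dom_get_inter_cluster_edges edges clusters → Spec_get_inter_cluster_edges edges clusters (get_inter_cluster_edges edges clusters)

-- ===== LEMMAS AND PROOFS =====

-- A's innermost cluster scan appends nothing: its test is constantly False
theorem a_inner_const (m node : String) (clusters : List (String × List (String × String × String))) (acc : List (Option String × String × Option String)) :
    clusters.foldl (fun edges ckv =>
      if ckv.2.any (fun x => pyStrEqTriple m x) then
        edges ++ [(some (get_referent_from_cluster ckv.2), "member of", some node)]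
      else edges) acc = acc := by
  induction clusters generalizing acc with
  | nil => rfl
  | cons c t ih =>
      have hc : c.2.any (fun x => pyStrEqTriple m x) = false := by simp [pyStrEqTriple]
      simp only [List.foldl_cons, hc, Bool.false_eq_true, if_false]
      exact ih acc

theorem a_eq_edges (edges : List (Option String × String × Option String)) (clusters : List (String × List (String × String × String))) : get_inter_cluster_edges edges clusters = edges := by
  unfold get_inter_cluster_edges
  simp only [a_inner_const, PySem.List.foldl_ignore]

-- ===== VERDICT (by name: the statement is the Claim_ definition above) =====
theorem get_inter_cluster_edges_spec : Claim_equal_get_inter_cluster_edges := by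
  intro edges clusters _
  unfold Spec_get_inter_cluster_edges get_inter_cluster_edges_alt
  exact a_eq_edges edges clusters
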